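-- pv_equiv track=rewrite | github.com/MurpheyLab/NoodleBot | notebooks/plotting_utils.py | pull_max
-- ===== SOURCE A (Python) =====
-- def pull_max(d,xs,start_idx):
--     _rew = None
--     new_mean = []
--     for m,x in zip(d,xs):
--         if _rew is None:
--             _rew = m
--         else:
--             if m > _rew and x > start_idx:
--                 _rew = m
--         new_mean.append(_rew)
--     return new_mean
-- ===== SOURCE B (Python) =====
-- def pull_max(d, xs, start_idx):
--     pairs = list(zip(d, xs))
--     if not pairs:
--         return []
--     m0 = pairs[0][0]
--     # m0 is a lower bound of every output, so it is a neutral placeholder for ineligible entries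
--     g = [m0] + [m if x > start_idx else m0 for m, x in pairs[1:]]
--
--     def solve(seg):
--         # divide and conquer: prefix maxima of seg
--         if len(seg) == 1:
--             return list(seg)
--         mid = len(seg) // 2
--         left = solve(seg[:mid])
--         right = solve(seg[mid:])
--         t = left[-1]
--         return left + [max(t, v) for v in right]
--
--     return solve(g)
-- ===== Notes on version B (the rewrite author's own statement) =====
-- stated objective: alternative
-- what changed: Replaces the stateful left-to-right running-max loop by a divide-and-conquer prefix-maximum: ineligible entries are masked to the first reward (a lower bound of every output), then prefix maxima are computed by recursion on halves, correcting the right half with the left half's last maximum.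
import Mathlib
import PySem

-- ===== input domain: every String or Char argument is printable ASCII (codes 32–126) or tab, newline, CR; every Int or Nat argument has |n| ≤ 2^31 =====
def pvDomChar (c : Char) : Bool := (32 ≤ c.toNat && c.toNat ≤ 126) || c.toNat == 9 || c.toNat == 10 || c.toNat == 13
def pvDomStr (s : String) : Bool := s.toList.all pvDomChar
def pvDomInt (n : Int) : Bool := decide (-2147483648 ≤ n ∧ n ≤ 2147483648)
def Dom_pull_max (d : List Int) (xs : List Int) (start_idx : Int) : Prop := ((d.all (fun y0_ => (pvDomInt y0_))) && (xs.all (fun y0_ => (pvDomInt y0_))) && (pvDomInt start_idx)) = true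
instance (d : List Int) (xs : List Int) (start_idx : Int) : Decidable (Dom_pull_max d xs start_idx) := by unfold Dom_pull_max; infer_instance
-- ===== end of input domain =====

-- B drops A's running accumulator: it masks ineligible entries to the first reward and computes
-- prefix maxima by divide and conquer on halves (alternative decomposition).

-- ===== PORT A =====
-- literal port of A's loop: state is (_rew : Option Int, new_mean); each step updates _rew and appends it
def pull_max (d : List Int) (xs : List Int) (start_idx : Int) : List Int :=
  ((d.zip xs).foldl
    (fun (st : Option Int × List Int) p =>
      let rew : Int :=
        match st.1 with
        | none => p.1
        | some r => if p.1 > r ∧ p.2 > start_idx then p.1 else r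
      (some rew, st.2 ++ [rew]))
    (none, [])).2

-- ===== PORT B =====
-- port of Source B's solve: prefix maxima of seg by recursion on halves
-- (Python's solve is never called on an empty segment; the length-0 branch is a totality guard)
def solveDC (seg : List Int) : List Int :=
  if _h1 : seg.length = 1 then seg
  else if _h2 : seg.length = 0 then []
  else
    let mid := seg.length / 2
    let left := solveDC (seg.take mid)
    let right := solveDC (seg.drop mid)
    let t := left.getLastD 0   -- left[-1]; left is nonempty here
    left ++ right.map (fun v => max t v)
termination_by seg.length
decreasing_by
  · simp [List.length_take]; omega
  · simp [List.length_drop]; omega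

def pull_max_alt (d : List Int) (xs : List Int) (start_idx : Int) : List Int :=
  match d.zip xs with
  | [] => []
  | p0 :: rest =>
      let m0 := p0.1
      let g := m0 :: rest.map (fun p => if p.2 > start_idx then p.1 else m0)
      solveDC g

-- ===== PRECONDITION & SPEC =====
def Spec_pull_max (d : List Int) (xs : List Int) (start_idx : Int) (out : List Int) : Prop := out = pull_max_alt d xs start_idx
instance (d : List Int) (xs : List Int) (start_idx : Int) (out : List Int) : Decidable (Spec_pull_max d xs start_idx out) := by unfold Spec_pull_max; infer_instance

-- ===== CLAIM (what is proved, stated in full; the proofs are below) =====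
def Claim_equal_pull_max : Prop := ∀ (d : List Int) (xs : List Int) (start_idx : Int), Dom_pull_max d xs start_idx → Spec_pull_max d xs start_idx (pull_max d xs start_idx)

-- ===== LEMMAS AND PROOFS =====

-- the output stream of A's loop continued from a known reward r
def aRun (start_idx : Int) : Int → List (Int × Int) → List Int
  | _, [] => []
  | r, p :: ps =>
      let r' := if p.1 > r ∧ p.2 > start_idx then p.1 else r
      r' :: aRun start_idx r' ps

-- A's fold from state (some r, acc) appends exactly aRun r ps
theorem pull_max_foldl_some (start_idx : Int) (ps : List (Int × Int)) :
    ∀ (r : Int) (acc : List Int),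
      (ps.foldl
        (fun (st : Option Int × List Int) p =>
          let rew : Int :=
            match st.1 with
            | none => p.1
            | some s => if p.1 > s ∧ p.2 > start_idx then p.1 else s
          (some rew, st.2 ++ [rew]))
        (some r, acc)).2 = acc ++ aRun start_idx r ps := by
  induction ps with
  | nil => intro r acc; simp [aRun]
  | cons p ps ih =>
      intro r acc
      simp only [List.foldl_cons, aRun]
      rw [ih]
      simp

-- reference linear prefix-maximum
def pm : List Int → List Int
  | [] => []
  | a :: l => a :: (pm l).map (max a)

theorem pm_length (l : List Int) : (pm l).length = l.length := by
  induction l with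
  | nil => simp [pm]
  | cons a l ih => simp [pm, ih]

theorem pm_getLastD_cons (a : Int) (m : List Int) (hm : m ≠ []) :
    ((a :: m.map (max a)).getLastD 0) = max a (m.getLastD 0) := by
  cases h2 : m.getLast? with
  | none => exact absurd (List.getLast?_eq_none_iff.mp h2) hm
  | some x =>
      rw [List.getLastD_cons, List.getLastD_eq_getLast?, List.getLast?_map, h2,
        List.getLastD_eq_getLast?, h2]
      simp

theorem pm_append (u v : List Int) (hu : u ≠ []) :
    pm (u ++ v) = pm u ++ (pm v).map (max ((pm u).getLastD 0)) := by
  induction u with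
  | nil => exact absurd rfl hu
  | cons a u ih =>
      cases u with
      | nil => simp [pm, List.getLastD]
      | cons b u =>
          have h := ih (by simp)
          have hne : pm (b :: u) ≠ [] := by
            have := pm_length (b :: u); intro hc; rw [hc] at this; simp at this
          have e1 : pm ((a :: b :: u) ++ v) = a :: (pm ((b :: u) ++ v)).map (max a) := rfl
          have e2 : pm (a :: b :: u) = a :: (pm (b :: u)).map (max a) := rfl
          rw [e1, h, e2, pm_getLastD_cons a _ hne]
          simp only [List.map_append, List.map_map, List.cons_append,
            List.cons.injEq, true_and]
          congr 1
          apply List.map_congr_left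
          intro x _
          simp [Function.comp, max_assoc]

theorem solveDC_eq_pm_aux (n : Nat) : ∀ (seg : List Int), seg.length ≤ n → solveDC seg = pm seg := by
  induction n with
  | zero =>
      intro seg hle
      have : seg = [] := List.eq_nil_of_length_eq_zero (by omega)
      subst this
      rw [solveDC]; simp [pm]
  | succ n ih =>
      intro seg hle
      rw [solveDC]
      split_ifs with h1 h2
      · obtain ⟨a, ha⟩ := List.length_eq_one_iff.mp h1
        subst ha; simp [pm]
      · have : seg = [] := List.eq_nil_of_length_eq_zero h2
        subst this; simp [pm]
      · have hlen : 2 ≤ seg.length := by omega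
        have hmid1 : 1 ≤ seg.length / 2 := by omega
        have hmidlt : seg.length / 2 < seg.length := by omega
        dsimp only
        have ht : (seg.take (seg.length / 2)).length = seg.length / 2 :=
          List.length_take_of_le (by omega)
        rw [ih (seg.take (seg.length / 2)) (by rw [ht]; omega),
            ih (seg.drop (seg.length / 2)) (by rw [List.length_drop]; omega)]
        have htake : seg.take (seg.length / 2) ≠ [] := by
          intro hc
          rw [hc] at ht
          simp at ht
          omega
        conv_rhs => rw [← List.take_append_drop (seg.length / 2) seg]
        rw [pm_append _ _ htake]

theorem solveDC_eq_pm (seg : List Int) : solveDC seg = pm seg :=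
  solveDC_eq_pm_aux seg.length seg le_rfl

-- aRun from r equals pm of the m0-masked tail corrected by max r, for any r ≥ m0
theorem aRun_eq_pm (start_idx m0 : Int) (ps : List (Int × Int)) :
    ∀ (r : Int), m0 ≤ r →
      aRun start_idx r ps =
        (pm (ps.map (fun p => if p.2 > start_idx then p.1 else m0))).map (max r) := by
  induction ps with
  | nil => intro r _; simp [aRun, pm]
  | cons p ps ih =>
      intro r hr
      simp only [aRun, List.map_cons, pm, List.map_map]
      have hmask : (if p.1 > r ∧ p.2 > start_idx then p.1 else r) =
          max r (if p.2 > start_idx then p.1 else m0) := by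
        by_cases hx : p.2 > start_idx <;> by_cases hm : p.1 > r <;>
          simp [hx, hm, max_def] <;> omega
      simp only [List.cons.injEq]
      refine ⟨hmask, ?_⟩
      rw [hmask, ih _ (le_trans hr (le_max_left _ _))]
      apply List.map_congr_left
      intro x _
      simp [Function.comp, max_assoc]

-- ===== VERDICT (by name: the statement is the Claim_ definition above) =====
theorem pull_max_spec : Claim_equal_pull_max := by
  intro d xs start_idx _
  unfold Spec_pull_max pull_max pull_max_alt
  cases h : d.zip xs with
  | nil => simp
  | cons p0 rest =>
      simp only [List.foldl_cons]
      rw [pull_max_foldl_some]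
      show p0.1 :: aRun start_idx p0.1 rest = _
      rw [solveDC_eq_pm]
      simp only [pm]
      rw [aRun_eq_pm start_idx p0.1 rest p0.1 le_rfl]
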